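-- pv_equiv track=rewrite | github.com/monicagiraldochica/MKautomation | TBSS.py | createFarrays
-- ===== SOURCE A (Python) =====
-- def createFarrays(ncontrast_array):
--     num_ftest = len(ncontrast_array)
--     ftest_array = []
--
--     # One line per f-test
--     for i in range(num_ftest):
--         array = []
--         # For each ftest write 1s in the corresponding column if i is the corresponding ftest, 0 otherwise
--         for j in range(num_ftest):
--             for k in range(ncontrast_array[j]):
--                 array+=[int(i==j)]
--         ftest_array+=[array]
--
--     return ftest_array
-- ===== SOURCE B (Python) =====
-- def createFarrays(ncontrast_array):
--     sizes = [c if c > 0 else 0 for c in ncontrast_array]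
--     total = sum(sizes)
--     rows = []
--     start = 0
--     for s in sizes:
--         rows.append([0] * start + [1] * s + [0] * (total - start - s))
--         start += s
--     return rows
-- ===== Notes on version B (the rewrite author's own statement) =====
-- stated objective: faster
-- what changed: Replaces the nested (j,k) scan with int(i==j) per row by a one-time size/prefix-offset computation and direct block construction ([0]*start + [1]*s + [0]*rest) per row.
import Mathlib
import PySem

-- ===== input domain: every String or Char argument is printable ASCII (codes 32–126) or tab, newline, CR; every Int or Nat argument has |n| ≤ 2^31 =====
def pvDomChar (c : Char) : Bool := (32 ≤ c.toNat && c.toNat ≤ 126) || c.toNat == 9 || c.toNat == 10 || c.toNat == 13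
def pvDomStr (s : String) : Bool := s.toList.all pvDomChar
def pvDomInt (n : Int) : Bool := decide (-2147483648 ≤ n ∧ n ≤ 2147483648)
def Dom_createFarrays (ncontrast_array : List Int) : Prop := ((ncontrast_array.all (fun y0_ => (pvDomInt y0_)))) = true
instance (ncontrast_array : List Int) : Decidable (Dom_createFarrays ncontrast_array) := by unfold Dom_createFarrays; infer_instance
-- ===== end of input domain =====

-- B replaces A's nested (j,k) indicator scan per row by a one-pass prefix-offset
-- computation with direct block construction of each row (objective: faster).

-- ===== PORT A =====
def createFarrays (ncontrast_array : List Int) : List (List Int) :=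
  let num_ftest := ncontrast_array.length
  (PySem.List.pyRange 0 num_ftest 1).foldl (fun ftest_array i =>
    ftest_array ++
      [((PySem.List.pyRange 0 num_ftest 1).foldl (fun array j =>
          (PySem.List.pyRange 0 (PySem.List.pyGetD ncontrast_array j 0) 1).foldl
            (fun array _ => array ++ [if i == j then (1 : Int) else 0]) array) [])]) []

-- ===== PORT B =====
def createFarrays_alt (ncontrast_array : List Int) : List (List Int) :=
  let sizes := ncontrast_array.map (fun c => if c > 0 then c else 0)
  let total := sizes.sum
  (sizes.foldl (fun (st : List (List Int) × Int) s =>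
      (st.1 ++ [List.replicate st.2.toNat 0 ++ List.replicate s.toNat 1 ++
                List.replicate (total - st.2 - s).toNat 0], st.2 + s))
    ([], 0)).1

-- ===== PRECONDITION & SPEC =====
def Spec_createFarrays (ncontrast_array : List Int) (out : List (List Int)) : Prop := out = createFarrays_alt ncontrast_array
instance (ncontrast_array : List Int) (out : List (List Int)) : Decidable (Spec_createFarrays ncontrast_array out) := by unfold Spec_createFarrays; infer_instance

-- ===== CLAIM (what is proved, stated in full; the proofs are below) =====
def Claim_equal_createFarrays : Prop := ∀ (ncontrast_array : List Int), Dom_createFarrays ncontrast_array → Spec_createFarrays ncontrast_array (createFarrays ncontrast_array)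

-- ===== LEMMAS AND PROOFS =====

-- length of range(0, c)
theorem pv_len_pyRange (c : Int) : (PySem.List.pyRange 0 c 1).length = c.toNat := by
  simp [PySem.List.pyRange]; omega

theorem pv_flatMap_const {α : Type} (l : List α) (c : Int) :
    l.flatMap (fun _ => [c]) = List.replicate l.length c := by
  induction l with
  | nil => rfl
  | cons y ys ih => simp [ih, List.replicate_succ]

-- A's outer row i, normalized to a flatMap of indicator blocks
theorem pv_A_eq (a : List Int) :
    createFarrays a = (List.range a.length).map (fun i =>
      (List.range a.length).flatMap (fun j =>
        List.replicate (a.getD j 0).toNat (if i = j then (1 : Int) else 0))) := by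
  simp only [createFarrays]
  rw [PySem.List.pyRange_zero_natCast, List.foldl_map,
      PySem.List.foldl_append_singleton_eq_map, List.nil_append]
  refine List.map_congr_left (fun i _ => ?_)
  rw [List.foldl_map]
  have h : ∀ (j : Nat) (acc : List Int),
      (PySem.List.pyRange 0 (PySem.List.pyGetD a (j : Int) 0) 1).foldl
        (fun array _ => array ++ [if ((i : Int) == (j : Int)) then (1 : Int) else 0]) acc
      = acc ++ List.replicate (a.getD j 0).toNat (if i = j then (1 : Int) else 0) := by
    intro j acc
    rw [show (fun (array : List Int) (_ : Int) => array ++ [if ((i : Int) == (j : Int)) then (1 : Int) else 0])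
          = (fun array x => array ++ (fun _ => [if ((i : Int) == (j : Int)) then (1 : Int) else 0]) x) from rfl,
        PySem.List.foldl_append_eq_flatMap]
    congr 1
    rw [pv_flatMap_const, pv_len_pyRange, PySem.List.pyGetD_natCast]
    congr 1
    simp [Nat.cast_inj]
  have hstep : ∀ (l : List Nat) (acc : List Int),
      List.foldl (fun (array : List Int) (j : Nat) =>
        (PySem.List.pyRange 0 (PySem.List.pyGetD a (Nat.cast j) 0) 1).foldl
          (fun array _ => array ++ [if ((Nat.cast i : Int) == (Nat.cast j : Int)) then (1 : Int) else 0]) array) acc l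
      = acc ++ l.flatMap (fun j => List.replicate (a.getD j 0).toNat (if i = j then (1 : Int) else 0)) := by
    intro l
    induction l with
    | nil => simp
    | cons x xs ih =>
        intro acc
        rw [List.foldl_cons, h x acc, ih, List.flatMap_cons, List.append_assoc]
  simpa using hstep (List.range a.length) []

-- indicator flatMap = zero block ++ one block ++ zero block (all entries nonneg)
theorem pv_flat_zeros (s : List Int) (h : ∀ x ∈ s, 0 ≤ x) :
    (List.range s.length).flatMap (fun j => List.replicate (s.getD j 0).toNat (0 : Int))
      = List.replicate s.sum.toNat 0 := by
  induction s with
  | nil => simp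
  | cons x xs ih =>
      have hx : 0 ≤ x := h x (by simp)
      have hxs : 0 ≤ xs.sum := List.sum_nonneg (fun y hy => h y (by simp [hy]))
      rw [List.length_cons, List.range_succ_eq_map, List.flatMap_cons, List.flatMap_map]
      simp only [List.getD_cons_zero, List.getD_cons_succ]
      rw [ih (fun y hy => h y (by simp [hy])), List.sum_cons,
          show (x + xs.sum).toNat = x.toNat + xs.sum.toNat by omega, List.replicate_add]

theorem pv_flat_eq (s : List Int) (h : ∀ x ∈ s, 0 ≤ x) (i : Nat) (hi : i < s.length) :
    (List.range s.length).flatMap (fun j =>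
        List.replicate (s.getD j 0).toNat (if i = j then (1 : Int) else 0))
      = List.replicate ((s.take i).sum).toNat 0 ++ List.replicate (s.getD i 0).toNat 1 ++
        List.replicate ((s.drop (i + 1)).sum).toNat 0 := by
  induction s generalizing i with
  | nil => simp at hi
  | cons x xs ih =>
      have hxs : ∀ y ∈ xs, 0 ≤ y := fun y hy => h y (by simp [hy])
      rw [List.length_cons, List.range_succ_eq_map, List.flatMap_cons, List.flatMap_map]
      cases i with
      | zero =>
          simp only [List.getD_cons_zero, List.getD_cons_succ]
          have : ∀ j : Nat, (if (0 : Nat) = j + 1 then (1 : Int) else 0) = 0 := by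
            intro j; simp
          simp only [this]
          rw [pv_flat_zeros xs hxs]
          simp
      | succ i' =>
          simp only [List.getD_cons_zero, List.getD_cons_succ,
            show (i' + 1 = 0) = False by simp, if_false]
          have : ∀ j : Nat, (if i' + 1 = j + 1 then (1 : Int) else 0)
              = (if i' = j then (1 : Int) else 0) := by intro j; simp
          simp only [this]
          rw [ih hxs i' (by simpa using hi)]
          have hx : 0 ≤ x := h x (by simp)
          have hpre : 0 ≤ (xs.take i').sum :=
            List.sum_nonneg (fun y hy => hxs y (List.mem_of_mem_take hy))
          rw [List.take_succ_cons, List.sum_cons, List.drop_succ_cons]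
          simp only [show (x + (xs.take i').sum).toNat = x.toNat + (xs.take i').sum.toNat from by
            omega, List.replicate_add, List.append_assoc]

-- B's fold, generalized over accumulator and running offset
theorem pv_B_fold (s : List Int) (total : Int) (acc : List (List Int)) (off : Int) :
    (s.foldl (fun (st : List (List Int) × Int) x =>
        (st.1 ++ [List.replicate st.2.toNat 0 ++ List.replicate x.toNat 1 ++
                  List.replicate (total - st.2 - x).toNat 0], st.2 + x))
      (acc, off)).1
    = acc ++ (List.range s.length).map (fun i =>
        List.replicate (off + (s.take i).sum).toNat 0 ++
        List.replicate (s.getD i 0).toNat 1 ++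
        List.replicate (total - (off + (s.take i).sum) - s.getD i 0).toNat 0) := by
  induction s generalizing acc off with
  | nil => simp
  | cons x xs ih =>
      rw [List.foldl_cons, ih, List.length_cons, List.range_succ_eq_map, List.map_cons,
          List.map_map]
      simp only [List.getD_cons_zero, List.take_zero, List.sum_nil, add_zero]
      rw [List.append_assoc, List.singleton_append]
      congr 2
      refine List.map_congr_left (fun i _ => ?_)
      simp only [Function.comp_apply, List.take_succ_cons, List.sum_cons, List.getD_cons_succ]
      rw [add_assoc]

-- ===== VERDICT (by name: the statement is the Claim_ definition above) =====
theorem createFarrays_spec : Claim_equal_createFarrays := by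
  intro a _
  show createFarrays a = createFarrays_alt a
  unfold createFarrays_alt
  set sizes := a.map (fun c => if c > 0 then c else 0) with hsz
  have hnn : ∀ x ∈ sizes, 0 ≤ x := by
    intro x hx
    rw [hsz] at hx
    obtain ⟨c, _, rfl⟩ := List.mem_map.mp hx
    split_ifs with hc <;> omega
  rw [pv_B_fold, List.nil_append, pv_A_eq]
  have hlen : sizes.length = a.length := by simp [hsz]
  rw [← hlen]
  refine List.map_congr_left (fun i hi => ?_)
  have hi' : i < sizes.length := List.mem_range.mp hi
  have hkey : ∀ j : Nat, j < sizes.length → (a.getD j 0).toNat = (sizes.getD j 0).toNat := by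
    intro j hj
    have hj' : j < a.length := by omega
    rw [List.getD_eq_getElem _ _ hj', hsz,
        List.getD_eq_getElem _ _ (by simpa using hj'), List.getElem_map]
    split_ifs with hc <;> omega
  have hA : (List.range sizes.length).flatMap (fun j =>
      List.replicate (a.getD j 0).toNat (if i = j then (1 : Int) else 0))
      = (List.range sizes.length).flatMap (fun j =>
      List.replicate (sizes.getD j 0).toNat (if i = j then (1 : Int) else 0)) := by
    refine List.flatMap_congr (fun j hj => ?_)
    rw [hkey j (List.mem_range.mp hj)]
  rw [hA, pv_flat_eq sizes hnn i hi']
  have hsplit : sizes.sum - (sizes.take i).sum - sizes.getD i 0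
      = (sizes.drop (i + 1)).sum := by
    have h1 := List.sum_take_add_sum_drop sizes i
    have h2 : sizes.drop i = sizes.getD i 0 :: sizes.drop (i + 1) := by
      rw [List.getD_eq_getElem _ _ hi']
      exact (List.drop_eq_getElem_cons hi')
    rw [h2, List.sum_cons] at h1
    omega
  rw [zero_add, hsplit]
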